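-- pv_equiv track=rewrite | github.com/pr4nshul/CFC-Python-DSA-March | Kartik_Behl/Assignment_5.py | sum_of_left_right_equal_count
-- ===== SOURCE A (Python) =====
-- def sum_of_left_right_equal_count(inp_arr,idx,left=[],right=[]):
--     if idx == len(inp_arr):
--         if sum(left) == sum(right):
--             return 1
--         return 0
--     left.append(inp_arr[idx])
--     count_l = sum_of_left_right_equal_count(inp_arr,idx + 1 ,left,right)
--     left.pop()
--     right.append(inp_arr[idx])
--     count_r = sum_of_left_right_equal_count(inp_arr,idx + 1,left,right)
--     right.pop()
--     return count_l + count_r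
-- ===== SOURCE B (Python) =====
-- def _distribute(counts, x):
--     # send every accumulated difference d both ways: to the left (d + x) and to the right (d - x)
--     nxt = {}
--     for d, c in counts.items():
--         nxt[d + x] = nxt.get(d + x, 0) + c
--         nxt[d - x] = nxt.get(d - x, 0) + c
--     return nxt
--
-- def sum_of_left_right_equal_count(inp_arr, idx, left=[], right=[]):
--     # DP over partition-sum differences: counts[d] = number of ways the elements
--     # handled so far give (left sum - right sum) == d.
--     counts = {sum(left) - sum(right): 1}
--     for i in range(idx, len(inp_arr)):
--         counts = _distribute(counts, inp_arr[i])
--     return counts.get(0, 0)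
-- ===== Notes on version B (the rewrite author's own statement) =====
-- stated objective: faster
-- what changed: Replaced the exponential recursion that tries putting each element left or right (2^n leaves, each re-summing the lists) by a one-pass subset-sum DP over a dictionary counting how many assignments reach each left-minus-right sum difference, answering with the count at difference 0.
import Mathlib
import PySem

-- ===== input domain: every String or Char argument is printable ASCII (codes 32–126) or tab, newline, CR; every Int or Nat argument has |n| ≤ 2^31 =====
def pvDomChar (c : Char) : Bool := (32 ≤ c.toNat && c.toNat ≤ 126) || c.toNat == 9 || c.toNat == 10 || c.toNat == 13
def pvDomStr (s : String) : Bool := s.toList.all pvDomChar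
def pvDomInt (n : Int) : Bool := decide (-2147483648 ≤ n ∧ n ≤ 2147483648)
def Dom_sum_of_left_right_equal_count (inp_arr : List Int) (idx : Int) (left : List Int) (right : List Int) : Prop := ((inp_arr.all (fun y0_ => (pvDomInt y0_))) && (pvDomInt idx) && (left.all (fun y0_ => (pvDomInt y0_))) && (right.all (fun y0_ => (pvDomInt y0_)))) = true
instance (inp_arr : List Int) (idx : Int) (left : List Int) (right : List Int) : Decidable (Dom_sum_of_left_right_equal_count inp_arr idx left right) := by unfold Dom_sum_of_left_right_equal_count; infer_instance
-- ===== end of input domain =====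

-- B replaces A's exponential left/right recursion by a one-pass dictionary DP over
-- reachable (left sum - right sum) differences; equality of RETURN values is proved
-- (A's append/pop mutations of its default lists are balanced and not observable).

-- ===== PORT A =====
def sum_of_left_right_equal_count (inp_arr : List Int) (idx : Int) (left : List Int) (right : List Int) : Int :=
  if idx = (inp_arr.length : Int) then
    (if left.sum = right.sum then 1 else 0)
  else
    match h : PySem.List.pyGet? inp_arr idx with
    | none => 0   -- Python raises IndexError here; excluded by Pre_
    | some x =>
        sum_of_left_right_equal_count inp_arr (idx + 1) (left ++ [x]) right +
        sum_of_left_right_equal_count inp_arr (idx + 1) left (right ++ [x])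
termination_by ((inp_arr.length : Int) - idx).toNat
decreasing_by
  all_goals
    have hin : PySem.Raise.InRange inp_arr.length idx := by
      by_contra hc
      rw [← PySem.List.pyGet?_eq_none_iff (xs := inp_arr)] at hc
      simp [hc] at h
    unfold PySem.Raise.InRange at hin
    omega

-- ===== PORT B =====
-- helper: Source B's _distribute(counts, x)
def pvDistribute (counts : PySem.Dict Int Int) (x : Int) : PySem.Dict Int Int :=
  counts.items.foldl
    (fun nxt p =>
      let n1 := nxt.insert (p.1 + x) (nxt.getD (p.1 + x) 0 + p.2)
      n1.insert (p.1 - x) (n1.getD (p.1 - x) 0 + p.2))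
    PySem.Dict.empty

def sum_of_left_right_equal_count_alt (inp_arr : List Int) (idx : Int) (left : List Int) (right : List Int) : Int :=
  let counts :=
    (PySem.List.pyRange idx (inp_arr.length : Int) 1).foldl
      (fun counts i => pvDistribute counts (PySem.List.pyGetD inp_arr i 0))
      (PySem.Dict.empty.insert (left.sum - right.sum) 1)
  counts.getD 0 0

-- ===== PRECONDITION & SPEC =====
-- Pre_ excludes exactly the inputs where the Python A raises IndexError on inp_arr[idx]:
-- idx < -len(inp_arr) or idx > len(inp_arr).
def Pre_sum_of_left_right_equal_count (inp_arr : List Int) (idx : Int) (left : List Int) (right : List Int) : Prop :=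
  -(inp_arr.length : Int) ≤ idx ∧ idx ≤ (inp_arr.length : Int)
instance (inp_arr : List Int) (idx : Int) (left : List Int) (right : List Int) : Decidable (Pre_sum_of_left_right_equal_count inp_arr idx left right) := by unfold Pre_sum_of_left_right_equal_count; infer_instance

def pvWitness_sum_of_left_right_equal_count : List Int × Int × List Int × List Int := ([1, 2, 3], 0, [], [])

def Spec_sum_of_left_right_equal_count (inp_arr : List Int) (idx : Int) (left : List Int) (right : List Int) (out : Int) : Prop := out = sum_of_left_right_equal_count_alt inp_arr idx left right
instance (inp_arr : List Int) (idx : Int) (left : List Int) (right : List Int) (out : Int) : Decidable (Spec_sum_of_left_right_equal_count inp_arr idx left right out) := by unfold Spec_sum_of_left_right_equal_count; infer_instance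

-- ===== CLAIM (what is proved, stated in full; the proofs are below) =====
def Claim_equal_sum_of_left_right_equal_count : Prop := ∀ (inp_arr : List Int) (idx : Int) (left : List Int) (right : List Int), Dom_sum_of_left_right_equal_count inp_arr idx left right → Pre_sum_of_left_right_equal_count inp_arr idx left right → Spec_sum_of_left_right_equal_count inp_arr idx left right (sum_of_left_right_equal_count inp_arr idx left right)

-- ===== LEMMAS AND PROOFS =====

-- the common mathematical content: pvCnt xs d = number of ± sign assignments over xs with d + Σ εᵢxᵢ = 0
def pvCnt : List Int → Int → Int
  | [], d => if d = 0 then 1 else 0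
  | x :: xs, d => pvCnt xs (d + x) + pvCnt xs (d - x)

-- the elements A's recursion (and B's loop) visits, Python indexing included
def pvItems (arr : List Int) (idx : Int) : List Int :=
  (PySem.List.pyRange idx (arr.length : Int) 1).map (fun i => PySem.List.pyGetD arr i 0)

-- weighted sum of a dict's entries
def pvWsum (w : Int → Int) (ps : List (Int × Int)) : Int :=
  (ps.map (fun p => p.2 * w p.1)).sum

lemma pvWsum_nil (w : Int → Int) : pvWsum w [] = 0 := rfl

lemma pvWsum_cons (w : Int → Int) (p : Int × Int) (t : List (Int × Int)) :
    pvWsum w (p :: t) = p.2 * w p.1 + pvWsum w t := by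
  simp [pvWsum]

lemma pvWsum_append (w : Int → Int) (s t : List (Int × Int)) :
    pvWsum w (s ++ t) = pvWsum w s + pvWsum w t := by
  simp [pvWsum]

-- updating the (unique) entry at key m changes the weighted sum by (v - old) * w m
lemma pvWsum_map_update (w : Int → Int) (m old v : Int) :
    ∀ (ps : List (Int × Int)), (ps.map Prod.fst).Nodup →
      (PySem.Dict.mk ps).get? m = some old →
      pvWsum w (ps.map (fun p => if p.1 == m then (m, v) else p)) =
        pvWsum w ps + (v - old) * w m := by
  intro ps
  induction ps with
  | nil =>
    intro _ hg
    rw [show (PySem.Dict.mk ([] : List (Int × Int))).get? m = none from rfl] at hg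
    cases hg
  | cons a t ih =>
    intro hn hg
    rw [List.map_cons, List.nodup_cons] at hn
    obtain ⟨hmem, hn'⟩ := hn
    rw [PySem.Dict.get?_mk_cons] at hg
    by_cases ha : a.1 = m
    · have hb : (a.1 == m) = true := by simp [ha]
      rw [hb] at hg
      simp only [if_true] at hg
      have hold : a.2 = old := by simpa using hg
      have hid : t.map (fun p => if p.1 == m then (m, v) else p) = t.map id := by
        apply List.map_congr_left
        intro p hp
        have hpne : p.1 ≠ m := by
          intro hpm
          exact hmem (by rw [ha, ← hpm]; exact List.mem_map_of_mem hp)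
        simp [hpne]
      simp only [List.map_cons, hb, if_true, hid, List.map_id]
      rw [pvWsum_cons, pvWsum_cons, ha, ← hold]
      ring
    · have hb : (a.1 == m) = false := by simp [ha]
      rw [hb] at hg
      simp only [Bool.false_eq_true, if_false] at hg
      simp only [List.map_cons, hb, Bool.false_eq_true, if_false]
      rw [pvWsum_cons, pvWsum_cons, ih hn' hg]
      ring

-- ps-free form of pvWsum_map_update
lemma pvWsum_map_update' (w : Int → Int) (m old v : Int) (d : PySem.Dict Int Int)
    (hn : d.keys.Nodup) (hg : d.get? m = some old) :
    pvWsum w (d.items.map (fun p => if p.1 == m then (m, v) else p)) =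
      pvWsum w d.items + (v - old) * w m := by
  obtain ⟨ps⟩ := d
  exact pvWsum_map_update w m old v ps hn hg

-- 'd[m] = d.get(m, 0) + c' adds c * w m to the weighted sum
lemma pvWsum_addAt (w : Int → Int) (d : PySem.Dict Int Int) (hn : d.keys.Nodup) (m c : Int) :
    pvWsum w ((d.insert m (d.getD m 0 + c)).items) = pvWsum w d.items + c * w m := by
  by_cases hc : d.contains m = true
  · obtain ⟨old, hold⟩ : ∃ old, d.get? m = some old := by
      have h := PySem.Dict.contains_eq_isSome_get? d m
      rw [hc] at h
      exact Option.isSome_iff_exists.mp h.symm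
    have hgd : d.getD m 0 = old := PySem.Dict.getD_of_get?_eq_some d 0 hold
    rw [PySem.Dict.items_insert_of_contains d _ hc,
        pvWsum_map_update' w m old _ d hn hold, hgd]
    ring
  · have hc' : d.contains m = false := by simpa using hc
    rw [PySem.Dict.items_insert_of_not_contains d _ hc',
        PySem.Dict.getD_of_not_contains d _ hc', pvWsum_append]
    simp [pvWsum]

-- one pvDistribute pass, entry by entry
lemma pvWsum_distribute_aux (w : Int → Int) (x : Int) :
    ∀ (ps : List (Int × Int)) (N : PySem.Dict Int Int), N.keys.Nodup →
      (ps.foldl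
        (fun nxt p =>
          let n1 := nxt.insert (p.1 + x) (nxt.getD (p.1 + x) 0 + p.2)
          n1.insert (p.1 - x) (n1.getD (p.1 - x) 0 + p.2)) N).keys.Nodup ∧
      pvWsum w ((ps.foldl
        (fun nxt p =>
          let n1 := nxt.insert (p.1 + x) (nxt.getD (p.1 + x) 0 + p.2)
          n1.insert (p.1 - x) (n1.getD (p.1 - x) 0 + p.2)) N).items) =
        pvWsum w N.items + (ps.map (fun p => p.2 * (w (p.1 + x) + w (p.1 - x)))).sum := by
  intro ps
  induction ps with
  | nil => intro N hn; simpa using hn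
  | cons p t ih =>
    intro N hn
    have hn1 : (N.insert (p.1 + x) (N.getD (p.1 + x) 0 + p.2)).keys.Nodup :=
      PySem.Dict.nodup_keys_insert _ _ _ hn
    have hn2 : ((N.insert (p.1 + x) (N.getD (p.1 + x) 0 + p.2)).insert (p.1 - x)
        ((N.insert (p.1 + x) (N.getD (p.1 + x) 0 + p.2)).getD (p.1 - x) 0 + p.2)).keys.Nodup :=
      PySem.Dict.nodup_keys_insert _ _ _ hn1
    obtain ⟨hk, hs⟩ := ih _ hn2
    refine ⟨by simpa using hk, ?_⟩
    simp only [List.foldl_cons]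
    rw [hs]
    rw [pvWsum_addAt w _ hn1, pvWsum_addAt w _ hn]
    simp
    ring

-- the outer loop invariant: the final count at 0 is the pvCnt-weighted sum of the dict
lemma pvWsum_cnt_nil_zero : ∀ (t : List (Int × Int)), (∀ p ∈ t, p.1 ≠ (0 : Int)) →
    pvWsum (pvCnt []) t = 0 := by
  intro t
  induction t with
  | nil => intro _; rfl
  | cons q s ih =>
    intro h
    rw [pvWsum_cons, ih (fun p hp => h p (by simp [hp]))]
    simp [pvCnt, h q (by simp)]

lemma pvWsum_cnt_nil : ∀ (ps : List (Int × Int)), (ps.map Prod.fst).Nodup →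
    pvWsum (pvCnt []) ps = (PySem.Dict.mk ps).getD 0 0 := by
  intro ps
  induction ps with
  | nil => intro _; rfl
  | cons a t ih =>
    intro hn
    rw [List.map_cons, List.nodup_cons] at hn
    obtain ⟨hmem, hn'⟩ := hn
    rw [pvWsum_cons, PySem.Dict.getD_eq_get?_getD, PySem.Dict.get?_mk_cons]
    by_cases ha : a.1 = (0 : Int)
    · have hb : (a.1 == (0 : Int)) = true := by simp [ha]
      have hz : pvWsum (pvCnt []) t = 0 := by
        apply pvWsum_cnt_nil_zero
        intro p hp hp0
        exact hmem (by rw [ha, ← hp0]; exact List.mem_map_of_mem hp)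
      rw [hz, show pvCnt [] a.1 = 1 from by simp [pvCnt, ha], hb]
      simp
    · have hb : (a.1 == (0 : Int)) = false := by simp [ha]
      rw [hb]
      simp only [Bool.false_eq_true, if_false]
      rw [← PySem.Dict.getD_eq_get?_getD, ih hn',
        show pvCnt [] a.1 = 0 from by simp [pvCnt, ha]]
      ring

-- the outer loop invariant: the final count at 0 is the pvCnt-weighted sum of the dict
lemma pv_foldl_distribute (items : List Int) :
    ∀ (D : PySem.Dict Int Int), D.keys.Nodup →
      (items.foldl (fun counts x => pvDistribute counts x) D).getD 0 0 =
        pvWsum (pvCnt items) D.items := by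
  induction items with
  | nil =>
    intro D hn
    obtain ⟨ps⟩ := D
    exact (pvWsum_cnt_nil ps hn).symm
  | cons x t ih =>
    intro D hn
    simp only [List.foldl_cons]
    have hstep := pvWsum_distribute_aux (pvCnt t) x D.items PySem.Dict.empty (by simp [PySem.Dict.keys, PySem.Dict.empty])
    have hD : pvDistribute D x =
        D.items.foldl
          (fun nxt p =>
            let n1 := nxt.insert (p.1 + x) (nxt.getD (p.1 + x) 0 + p.2)
            n1.insert (p.1 - x) (n1.getD (p.1 - x) 0 + p.2)) PySem.Dict.empty := rfl
    rw [ih (pvDistribute D x) (by rw [hD]; exact hstep.1)]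
    rw [hD, hstep.2]
    simp [pvWsum, pvCnt, PySem.Dict.empty]

-- A computes pvCnt of the visited elements
lemma pvA_eq (arr : List Int) :
    ∀ (n : Nat) (idx : Int) (l r : List Int),
      ((arr.length : Int) - idx).toNat = n →
      -(arr.length : Int) ≤ idx → idx ≤ (arr.length : Int) →
      sum_of_left_right_equal_count arr idx l r = pvCnt (pvItems arr idx) (l.sum - r.sum) := by
  intro n
  induction n with
  | zero =>
    intro idx l r hfuel h1 h2
    have hidx : idx = (arr.length : Int) := by omega
    rw [sum_of_left_right_equal_count]
    rw [if_pos hidx]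
    have : pvItems arr idx = [] := by
      unfold pvItems
      rw [PySem.List.pyRange_one_eq_nil (by omega)]
      rfl
    rw [this]
    simp only [pvCnt]
    by_cases hs : l.sum = r.sum
    · simp [hs]
    · rw [if_neg hs, if_neg (by omega)]
  | succ m ih =>
    intro idx l r hfuel h1 h2
    have hlt : idx < (arr.length : Int) := by omega
    have hin : PySem.Raise.InRange arr.length idx := by
      unfold PySem.Raise.InRange; omega
    obtain ⟨x, hx⟩ : ∃ x, PySem.List.pyGet? arr idx = some x := by
      cases hg : PySem.List.pyGet? arr idx with
      | none => exact absurd ((PySem.List.pyGet?_eq_none_iff arr idx).mp hg) (not_not_intro hin)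
      | some y => exact ⟨y, rfl⟩
    rw [sum_of_left_right_equal_count]
    rw [if_neg (by omega)]
    have hitems : pvItems arr idx = x :: pvItems arr (idx + 1) := by
      unfold pvItems
      rw [PySem.List.pyRange_one_cons hlt]
      simp [PySem.List.pyGetD, hx]
    rw [hitems]
    simp only [pvCnt]
    split
    · next hnone => simp [hx] at hnone
    · next y hy =>
      rw [hx] at hy
      injection hy with hy'
      subst hy'
      rw [ih (idx + 1) (l ++ [x]) r (by omega) (by omega) (by omega),
          ih (idx + 1) l (r ++ [x]) (by omega) (by omega) (by omega)]
      simp only [List.sum_append, List.sum_cons, List.sum_nil]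
      ring_nf

-- B computes pvCnt of the visited elements
lemma pvB_eq (arr : List Int) (idx : Int) (l r : List Int) :
    sum_of_left_right_equal_count_alt arr idx l r = pvCnt (pvItems arr idx) (l.sum - r.sum) := by
  unfold sum_of_left_right_equal_count_alt
  have hmap :
      (PySem.List.pyRange idx (arr.length : Int) 1).foldl
          (fun counts i => pvDistribute counts (PySem.List.pyGetD arr i 0))
          (PySem.Dict.empty.insert (l.sum - r.sum) 1) =
        (pvItems arr idx).foldl (fun counts x => pvDistribute counts x)
          (PySem.Dict.empty.insert (l.sum - r.sum) 1) := by
    unfold pvItems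
    rw [List.foldl_map]
  rw [hmap]
  rw [pv_foldl_distribute _ _ (PySem.Dict.nodup_keys_insert _ _ _ (by simp [PySem.Dict.keys, PySem.Dict.empty]))]
  have hitems : (PySem.Dict.empty.insert (l.sum - r.sum) (1 : Int)).items = [(l.sum - r.sum, 1)] := by
    rw [PySem.Dict.items_insert_of_not_contains PySem.Dict.empty 1 (PySem.Dict.contains_empty _)]
    rfl
  rw [hitems, pvWsum_cons, pvWsum_nil]
  ring

-- ===== VERDICT (by name: the statement is the Claim_ definition above) =====
theorem sum_of_left_right_equal_count_spec : Claim_equal_sum_of_left_right_equal_count := by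
  intro inp_arr idx left right _ hpre
  unfold Spec_sum_of_left_right_equal_count
  rw [pvB_eq, pvA_eq inp_arr ((inp_arr.length : Int) - idx).toNat idx left right rfl hpre.1 hpre.2]
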